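-- pv_equiv track=rewrite | github.com/nehasreekolli007-wq/Feildproject | skill_extractor.py | get_skill_category
-- ===== SOURCE A (Python) =====
-- def get_skill_category(skills):
--     """
--     Categorize extracted skills
--
--     Args:
--         skills (list): List of extracted skills
--
--     Returns:
--         dict: Skills organized by category
--     """
--     categories = {
--         'Programming': [],
--         'Web Development': [],
--         'Database': [],
--         'Data Science & ML': [],
--         'Cloud & DevOps': [],
--         'Tools': []
--     }
--
--     programming_skills = ['Python', 'Java', 'JavaScript', 'C++', 'C#', 'PHP', 'Ruby', 'Go', 'Swift', 'Kotlin']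
--     web_skills = ['HTML', 'CSS', 'React', 'Vue', 'Angular', 'Django', 'Flask', 'FastAPI']
--     database_skills = ['SQL', 'MongoDB', 'Firebase', 'Redis', 'Oracle', 'SQLite']
--     ml_skills = ['Machine Learning', 'Deep Learning', 'Data Analysis', 'Pandas', 'NumPy', 'Scikit-learn', 'TensorFlow', 'PyTorch', 'Keras']
--     devops_skills = ['AWS', 'Azure', 'Google Cloud', 'Docker', 'Kubernetes', 'Jenkins', 'Git']
--     tools = ['REST API', 'GraphQL', 'Linux', 'Windows', 'MacOS', 'Excel', 'Tableau', 'Power BI']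
--
--     for skill in skills:
--         if skill in programming_skills:
--             categories['Programming'].append(skill)
--         elif skill in web_skills:
--             categories['Web Development'].append(skill)
--         elif skill in database_skills:
--             categories['Database'].append(skill)
--         elif skill in ml_skills:
--             categories['Data Science & ML'].append(skill)
--         elif skill in devops_skills:
--             categories['Cloud & DevOps'].append(skill)
--         else:
--             categories['Tools'].append(skill)
--
--     # Remove empty categories
--     return {k: v for k, v in categories.items() if v}
-- ===== SOURCE B (Python) =====
-- def get_skill_category(skills):
--     """Categorize extracted skills: one filtering pass per category (category-major)
--     instead of a per-skill elif chain. Correct because the six skill lists are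
--     pairwise disjoint, so elif precedence never matters."""
--     groups = [
--         ('Programming', {'Python', 'Java', 'JavaScript', 'C++', 'C#', 'PHP', 'Ruby', 'Go', 'Swift', 'Kotlin'}),
--         ('Web Development', {'HTML', 'CSS', 'React', 'Vue', 'Angular', 'Django', 'Flask', 'FastAPI'}),
--         ('Database', {'SQL', 'MongoDB', 'Firebase', 'Redis', 'Oracle', 'SQLite'}),
--         ('Data Science & ML', {'Machine Learning', 'Deep Learning', 'Data Analysis', 'Pandas', 'NumPy', 'Scikit-learn', 'TensorFlow', 'PyTorch', 'Keras'}),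
--         ('Cloud & DevOps', {'AWS', 'Azure', 'Google Cloud', 'Docker', 'Kubernetes', 'Jenkins', 'Git'}),
--     ]
--     known = set().union(*(members for _, members in groups))
--     result = {}
--     for label, members in groups:
--         bucket = [s for s in skills if s in members]
--         if bucket:
--             result[label] = bucket
--     rest = [s for s in skills if s not in known]
--     if rest:
--         result['Tools'] = rest
--     return result
-- ===== Notes on version B (the rewrite author's own statement) =====
-- stated objective: alternative
-- what changed: Category-major instead of skill-major: B makes one filter pass over skills per category (plus one remainder pass for 'Tools') with set membership, never building A's per-skill six-way elif list-scan dispatch; correct because the category lists are pairwise disjoint.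
import Mathlib
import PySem

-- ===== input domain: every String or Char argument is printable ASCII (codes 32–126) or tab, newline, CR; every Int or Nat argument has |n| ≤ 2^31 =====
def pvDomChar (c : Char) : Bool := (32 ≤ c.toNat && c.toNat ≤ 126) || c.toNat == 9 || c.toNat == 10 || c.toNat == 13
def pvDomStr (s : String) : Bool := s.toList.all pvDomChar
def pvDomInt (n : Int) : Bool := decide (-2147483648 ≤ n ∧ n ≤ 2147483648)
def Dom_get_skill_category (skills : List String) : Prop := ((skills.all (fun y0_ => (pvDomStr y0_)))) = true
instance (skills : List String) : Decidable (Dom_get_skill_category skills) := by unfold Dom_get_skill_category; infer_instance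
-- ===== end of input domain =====

-- B categorizes category-major (one filter pass of `skills` per category, plus a remainder pass for 'Tools')
-- instead of A's skill-major elif-chain pass; same results because the category lists are pairwise disjoint.

-- ===== PORT A =====
def programming_skills : List String := ["Python", "Java", "JavaScript", "C++", "C#", "PHP", "Ruby", "Go", "Swift", "Kotlin"]
def web_skills : List String := ["HTML", "CSS", "React", "Vue", "Angular", "Django", "Flask", "FastAPI"]
def database_skills : List String := ["SQL", "MongoDB", "Firebase", "Redis", "Oracle", "SQLite"]
def ml_skills : List String := ["Machine Learning", "Deep Learning", "Data Analysis", "Pandas", "NumPy", "Scikit-learn", "TensorFlow", "PyTorch", "Keras"]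
def devops_skills : List String := ["AWS", "Azure", "Google Cloud", "Docker", "Kubernetes", "Jenkins", "Git"]

def categories0 : PySem.Dict String (List String) :=
  PySem.Dict.ofList [("Programming", []), ("Web Development", []), ("Database", []),
    ("Data Science & ML", []), ("Cloud & DevOps", []), ("Tools", [])]

def get_skill_category (skills : List String) : List (String × List String) :=
  let categories := skills.foldl (fun cats skill =>
    if programming_skills.contains skill then cats.modify "Programming" [] (fun v => v ++ [skill])
    else if web_skills.contains skill then cats.modify "Web Development" [] (fun v => v ++ [skill])
    else if database_skills.contains skill then cats.modify "Database" [] (fun v => v ++ [skill])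
    else if ml_skills.contains skill then cats.modify "Data Science & ML" [] (fun v => v ++ [skill])
    else if devops_skills.contains skill then cats.modify "Cloud & DevOps" [] (fun v => v ++ [skill])
    else cats.modify "Tools" [] (fun v => v ++ [skill])) categories0
  categories.items.filter (fun p => !p.2.isEmpty)

-- ===== PORT B =====
def groups : List (String × List String) :=
  [("Programming", programming_skills), ("Web Development", web_skills), ("Database", database_skills),
   ("Data Science & ML", ml_skills), ("Cloud & DevOps", devops_skills)]

-- known = set().union(*(members for _, members in groups))
def known : List String := groups.foldl (fun s p => PySem.Set.union s p.2) []

def get_skill_category_alt (skills : List String) : List (String × List String) :=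
  let result := groups.foldl (fun res p =>
      let bucket := skills.filter (fun s => p.2.contains s)
      if bucket.isEmpty then res else res.insert p.1 bucket)
    (PySem.Dict.empty : PySem.Dict String (List String))
  let rest := skills.filter (fun s => !(known.contains s))
  (if rest.isEmpty then result else result.insert "Tools" rest).items

-- ===== PRECONDITION & SPEC =====
def Spec_get_skill_category (skills : List String) (out : List (String × List String)) : Prop := out = get_skill_category_alt skills
instance (skills : List String) (out : List (String × List String)) : Decidable (Spec_get_skill_category skills out) := by unfold Spec_get_skill_category; infer_instance

-- ===== CLAIM (what is proved, stated in full; the proofs are below) =====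
def Claim_equal_get_skill_category : Prop := ∀ (skills : List String), Dom_get_skill_category skills → Spec_get_skill_category skills (get_skill_category skills)

-- ===== LEMMAS AND PROOFS =====

-- the label A's elif chain assigns to one skill
def aLabel (s : String) : String :=
  if programming_skills.contains s then "Programming"
  else if web_skills.contains s then "Web Development"
  else if database_skills.contains s then "Database"
  else if ml_skills.contains s then "Data Science & ML"
  else if devops_skills.contains s then "Cloud & DevOps"
  else "Tools"

theorem step_eq : (fun (cats : PySem.Dict String (List String)) (skill : String) =>
    if programming_skills.contains skill then cats.modify "Programming" [] (fun v => v ++ [skill])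
    else if web_skills.contains skill then cats.modify "Web Development" [] (fun v => v ++ [skill])
    else if database_skills.contains skill then cats.modify "Database" [] (fun v => v ++ [skill])
    else if ml_skills.contains skill then cats.modify "Data Science & ML" [] (fun v => v ++ [skill])
    else if devops_skills.contains skill then cats.modify "Cloud & DevOps" [] (fun v => v ++ [skill])
    else cats.modify "Tools" [] (fun v => v ++ [skill]))
    = (fun cats skill => cats.modify (aLabel skill) [] (fun v => v ++ [skill])) := by
  funext cats skill
  unfold aLabel
  split_ifs <;> rfl

theorem aLabel_cases (s : String) :
    aLabel s = "Programming" ∨ aLabel s = "Web Development" ∨ aLabel s = "Database" ∨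
    aLabel s = "Data Science & ML" ∨ aLabel s = "Cloud & DevOps" ∨ aLabel s = "Tools" := by
  unfold aLabel; split_ifs <;> simp

-- loop invariant for A's fold: each category accumulates the skills the chain labels with it, in order
set_option maxRecDepth 10000 in
set_option maxHeartbeats 2000000 in
theorem fold_inv (l : List String) (v1 v2 v3 v4 v5 v6 : List String) :
    l.foldl (fun cats skill => cats.modify (aLabel skill) [] (fun v => v ++ [skill]))
      (PySem.Dict.ofList [("Programming", v1), ("Web Development", v2), ("Database", v3),
        ("Data Science & ML", v4), ("Cloud & DevOps", v5), ("Tools", v6)]) =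
    PySem.Dict.ofList [("Programming", v1 ++ l.filter (fun s => aLabel s == "Programming")),
      ("Web Development", v2 ++ l.filter (fun s => aLabel s == "Web Development")),
      ("Database", v3 ++ l.filter (fun s => aLabel s == "Database")),
      ("Data Science & ML", v4 ++ l.filter (fun s => aLabel s == "Data Science & ML")),
      ("Cloud & DevOps", v5 ++ l.filter (fun s => aLabel s == "Cloud & DevOps")),
      ("Tools", v6 ++ l.filter (fun s => aLabel s == "Tools"))] := by
  induction l generalizing v1 v2 v3 v4 v5 v6 with
  | nil => simp
  | cons x l ih =>
    rcases aLabel_cases x with h|h|h|h|h|h <;>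
      simp only [List.foldl_cons, h, List.filter_cons]
    case cons.inl =>
      rw [show (PySem.Dict.ofList [("Programming", v1), ("Web Development", v2), ("Database", v3), ("Data Science & ML", v4), ("Cloud & DevOps", v5), ("Tools", v6)]).modify "Programming" [] (fun v => v ++ [x]) = PySem.Dict.ofList [("Programming", v1 ++ [x]), ("Web Development", v2), ("Database", v3), ("Data Science & ML", v4), ("Cloud & DevOps", v5), ("Tools", v6)] from rfl, ih]
      simp [List.append_assoc]
    case cons.inr.inl =>
      rw [show (PySem.Dict.ofList [("Programming", v1), ("Web Development", v2), ("Database", v3), ("Data Science & ML", v4), ("Cloud & DevOps", v5), ("Tools", v6)]).modify "Web Development" [] (fun v => v ++ [x]) = PySem.Dict.ofList [("Programming", v1), ("Web Development", v2 ++ [x]), ("Database", v3), ("Data Science & ML", v4), ("Cloud & DevOps", v5), ("Tools", v6)] from rfl, ih]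
      simp [List.append_assoc]
    case cons.inr.inr.inl =>
      rw [show (PySem.Dict.ofList [("Programming", v1), ("Web Development", v2), ("Database", v3), ("Data Science & ML", v4), ("Cloud & DevOps", v5), ("Tools", v6)]).modify "Database" [] (fun v => v ++ [x]) = PySem.Dict.ofList [("Programming", v1), ("Web Development", v2), ("Database", v3 ++ [x]), ("Data Science & ML", v4), ("Cloud & DevOps", v5), ("Tools", v6)] from rfl, ih]
      simp [List.append_assoc]
    case cons.inr.inr.inr.inl =>
      rw [show (PySem.Dict.ofList [("Programming", v1), ("Web Development", v2), ("Database", v3), ("Data Science & ML", v4), ("Cloud & DevOps", v5), ("Tools", v6)]).modify "Data Science & ML" [] (fun v => v ++ [x]) = PySem.Dict.ofList [("Programming", v1), ("Web Development", v2), ("Database", v3), ("Data Science & ML", v4 ++ [x]), ("Cloud & DevOps", v5), ("Tools", v6)] from rfl, ih]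
      simp [List.append_assoc]
    case cons.inr.inr.inr.inr.inl =>
      rw [show (PySem.Dict.ofList [("Programming", v1), ("Web Development", v2), ("Database", v3), ("Data Science & ML", v4), ("Cloud & DevOps", v5), ("Tools", v6)]).modify "Cloud & DevOps" [] (fun v => v ++ [x]) = PySem.Dict.ofList [("Programming", v1), ("Web Development", v2), ("Database", v3), ("Data Science & ML", v4), ("Cloud & DevOps", v5 ++ [x]), ("Tools", v6)] from rfl, ih]
      simp [List.append_assoc]
    case cons.inr.inr.inr.inr.inr =>
      rw [show (PySem.Dict.ofList [("Programming", v1), ("Web Development", v2), ("Database", v3), ("Data Science & ML", v4), ("Cloud & DevOps", v5), ("Tools", v6)]).modify "Tools" [] (fun v => v ++ [x]) = PySem.Dict.ofList [("Programming", v1), ("Web Development", v2), ("Database", v3), ("Data Science & ML", v4), ("Cloud & DevOps", v5), ("Tools", v6 ++ [x])] from rfl, ih]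
      simp [List.append_assoc]


theorem cond_prog (s : String) : (programming_skills.contains s) = (aLabel s == "Programming") := by
  cases hc : programming_skills.contains s
  · unfold aLabel; split_ifs <;> simp_all
  · have hm : s ∈ programming_skills := List.contains_iff_mem.mp hc
    simp [programming_skills] at hm
    rcases hm with rfl|rfl|rfl|rfl|rfl|rfl|rfl|rfl|rfl|rfl <;> decide

theorem cond_web (s : String) : (web_skills.contains s) = (aLabel s == "Web Development") := by
  cases hc : web_skills.contains s
  · unfold aLabel; split_ifs <;> simp_all
  · have hm : s ∈ web_skills := List.contains_iff_mem.mp hc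
    simp [web_skills] at hm
    rcases hm with rfl|rfl|rfl|rfl|rfl|rfl|rfl|rfl <;> decide

theorem cond_db (s : String) : (database_skills.contains s) = (aLabel s == "Database") := by
  cases hc : database_skills.contains s
  · unfold aLabel; split_ifs <;> simp_all
  · have hm : s ∈ database_skills := List.contains_iff_mem.mp hc
    simp [database_skills] at hm
    rcases hm with rfl|rfl|rfl|rfl|rfl|rfl <;> decide

theorem cond_ml (s : String) : (ml_skills.contains s) = (aLabel s == "Data Science & ML") := by
  cases hc : ml_skills.contains s
  · unfold aLabel; split_ifs <;> simp_all
  · have hm : s ∈ ml_skills := List.contains_iff_mem.mp hc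
    simp [ml_skills] at hm
    rcases hm with rfl|rfl|rfl|rfl|rfl|rfl|rfl|rfl|rfl <;> decide

theorem cond_dev (s : String) : (devops_skills.contains s) = (aLabel s == "Cloud & DevOps") := by
  cases hc : devops_skills.contains s
  · unfold aLabel; split_ifs <;> simp_all
  · have hm : s ∈ devops_skills := List.contains_iff_mem.mp hc
    simp [devops_skills] at hm
    rcases hm with rfl|rfl|rfl|rfl|rfl|rfl|rfl <;> decide

set_option maxRecDepth 20000 in
theorem known_eq : known = (((programming_skills ++ web_skills) ++ database_skills) ++ ml_skills) ++ devops_skills := by rfl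

theorem cond_tools (s : String) : (!(known.contains s)) = (aLabel s == "Tools") := by
  cases hp : programming_skills.contains s <;> cases hw : web_skills.contains s <;>
    cases hd : database_skills.contains s <;> cases hm : ml_skills.contains s <;>
    cases hv : devops_skills.contains s <;>
    simp_all [known_eq, aLabel]

-- ===== VERDICT (by name: the statement is the Claim_ definition above) =====
set_option maxRecDepth 10000 in
set_option maxHeartbeats 2000000 in
theorem get_skill_category_spec : Claim_equal_get_skill_category := by
  intro skills _
  unfold Spec_get_skill_category get_skill_category get_skill_category_alt
  rw [step_eq,
    show categories0 = PySem.Dict.ofList [("Programming", ([] : List String)), ("Web Development", []),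
      ("Database", []), ("Data Science & ML", []), ("Cloud & DevOps", []), ("Tools", [])] from rfl,
    fold_inv]
  simp only [groups, List.foldl]
  rw [show (fun s => programming_skills.contains s) = (fun s => aLabel s == "Programming") from funext cond_prog,
    show (fun s => web_skills.contains s) = (fun s => aLabel s == "Web Development") from funext cond_web,
    show (fun s => database_skills.contains s) = (fun s => aLabel s == "Database") from funext cond_db,
    show (fun s => ml_skills.contains s) = (fun s => aLabel s == "Data Science & ML") from funext cond_ml,
    show (fun s => devops_skills.contains s) = (fun s => aLabel s == "Cloud & DevOps") from funext cond_dev,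
    show (fun s => !(known.contains s)) = (fun s => aLabel s == "Tools") from funext cond_tools]
  generalize skills.filter (fun s => aLabel s == "Programming") = b1
  generalize skills.filter (fun s => aLabel s == "Web Development") = b2
  generalize skills.filter (fun s => aLabel s == "Database") = b3
  generalize skills.filter (fun s => aLabel s == "Data Science & ML") = b4
  generalize skills.filter (fun s => aLabel s == "Cloud & DevOps") = b5
  generalize skills.filter (fun s => aLabel s == "Tools") = b6
  cases h1 : b1.isEmpty <;> cases h2 : b2.isEmpty <;> cases h3 : b3.isEmpty <;>
    cases h4 : b4.isEmpty <;> cases h5 : b5.isEmpty <;> cases h6 : b6.isEmpty <;>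
    simp_all [List.isEmpty_iff, PySem.Dict.ofList, PySem.Dict.insert, PySem.Dict.empty, PySem.Dict.contains, PySem.Dict.update]
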